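-- pv_equiv track=rewrite | github.com/usefordemo/Telegram_GPT_based_bot | news_service.py | _sanitize_sources
-- ===== SOURCE A (Python) =====
-- from typing import Dict, List, Optional, Tuple
--
-- def _sanitize_sources(sources: List[str]) -> List[str]:
--     seen, out = set(), []
--     for raw in sources or []:
--         if raw is None:
--             continue
--         for part in str(raw).split(","):
--             s = part.strip().lower().replace(" ", "-")
--             if s and s not in seen:
--                 out.append(s); seen.add(s)
--     return out
-- ===== SOURCE B (Python) =====
-- def _dedup(xs):
--     # Repeatedly take the first remaining token and filter all of its
--     # later duplicates out of the worklist before continuing.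
--     out = []
--     while xs:
--         h = xs[0]
--         out.append(h)
--         xs = [x for x in xs[1:] if x != h]
--     return out
--
--
-- def _sanitize_sources(sources):
--     tokens = [part.strip().lower().replace(" ", "-")
--               for raw in (sources or []) if raw is not None
--               for part in str(raw).split(",")]
--     return _dedup([t for t in tokens if t])
-- ===== Notes on version B (the rewrite author's own statement) =====
-- stated objective: alternative
-- what changed: Replaces A's single interleaved loop with a seen-set by a staged pipeline: flatten+normalize all tokens first, then dedup by a select-head-and-filter-out-its-duplicates worklist loop that keeps no auxiliary set at all.
import Mathlib
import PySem

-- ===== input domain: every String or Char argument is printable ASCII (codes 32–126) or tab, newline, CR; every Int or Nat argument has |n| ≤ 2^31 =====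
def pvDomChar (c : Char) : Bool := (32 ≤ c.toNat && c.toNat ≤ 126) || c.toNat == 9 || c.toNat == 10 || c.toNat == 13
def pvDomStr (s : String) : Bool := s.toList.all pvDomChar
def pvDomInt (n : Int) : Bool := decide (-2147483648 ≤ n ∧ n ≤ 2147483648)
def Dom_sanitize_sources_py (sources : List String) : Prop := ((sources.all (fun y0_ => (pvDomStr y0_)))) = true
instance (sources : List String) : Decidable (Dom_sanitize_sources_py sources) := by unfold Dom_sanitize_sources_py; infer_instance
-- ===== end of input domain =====

-- B stages the work: flatten+normalize all tokens, then dedup by a select-head-and-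
-- filter-out-its-duplicates worklist loop (no seen set) — objective: alternative.

-- raw.split(",") — the separator is the non-empty literal ",", so split? is always `some`
def pvSplitComma (s : String) : List String := (PySem.Str.split? s ",").getD []

-- ===== PORT A =====
-- the body of A's inner loop: normalize, then append when non-empty and unseen
def pvStepA (st : PySem.Set String × List String) (part : String) :
    PySem.Set String × List String :=
  let s := PySem.Str.replace (PySem.Str.lower (PySem.Str.strip part)) " " "-"
  if s ≠ "" ∧ ¬ PySem.Set.contains st.1 s then (PySem.Set.add st.1 s, st.2 ++ [s]) else st

-- seen, out = set(), []; `sources or []` iterates as sources; `raw is None` never holds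
-- for strings and str(raw) = raw; return out
def sanitize_sources_py (sources : List String) : List String :=
  (sources.foldl (fun st raw => (pvSplitComma raw).foldl pvStepA st)
    ((PySem.Set.empty : PySem.Set String), ([] : List String))).2

-- ===== PORT B =====
-- part.strip().lower().replace(" ", "-")
def pvNorm (part : String) : String :=
  PySem.Str.replace (PySem.Str.lower (PySem.Str.strip part)) " " "-"

-- _dedup: while xs: take xs[0], filter its duplicates out of the rest, continue
def pvDedup (xs : List String) : List String :=
  match xs with
  | [] => []
  | h :: t =>
    h :: pvDedup (t.filter (fun x => x ≠ h))
termination_by xs.length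
decreasing_by
  have := List.length_filter_le (fun x : {x // x ∈ t} => !decide (x.1 = h)) t.attach
  simpa using this

def sanitize_sources_py_alt (sources : List String) : List String :=
  let tokens := sources.flatMap (fun raw => (pvSplitComma raw).map pvNorm)
  pvDedup (tokens.filter (fun t => t ≠ ""))

-- ===== PRECONDITION & SPEC =====
def Spec_sanitize_sources_py (sources : List String) (out : List String) : Prop := out = sanitize_sources_py_alt sources
instance (sources : List String) (out : List String) : Decidable (Spec_sanitize_sources_py sources out) := by unfold Spec_sanitize_sources_py; infer_instance

-- ===== CLAIM (what is proved, stated in full; the proofs are below) =====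
def Claim_equal_sanitize_sources_py : Prop := ∀ (sources : List String), Dom_sanitize_sources_py sources → Spec_sanitize_sources_py sources (sanitize_sources_py sources)

-- ===== LEMMAS AND PROOFS =====

-- A's per-token step with the pair state collapsed (in A's fold, seen = out as lists)
def pvStep (acc : List String) (part : String) : List String :=
  if pvNorm part ≠ "" ∧ ¬ PySem.Set.contains acc (pvNorm part) then acc ++ [pvNorm part] else acc

theorem pvStepA_pair (acc : List String) (p : String) :
    pvStepA (acc, acc) p = (pvStep acc p, pvStep acc p) := by
  unfold pvStepA pvStep pvNorm
  split_ifs with h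
  · obtain ⟨h1, h2⟩ := h
    simp only [PySem.Set.add] at *
    simp at h2
    simp [h2, h1]
  · simp only [ne_eq] at h
    rw [if_neg h]

theorem pvPairCollapse (parts : List String) (acc : List String) :
    parts.foldl pvStepA ((acc : PySem.Set String), acc)
      = (parts.foldl pvStep acc, parts.foldl pvStep acc) := by
  induction parts generalizing acc with
  | nil => simp
  | cons p ps ih => rw [List.foldl_cons, pvStepA_pair, List.foldl_cons]; exact ih _

-- folding A's step equals building the dedup set over the filtered normalized tokens
theorem pvStepFilter (parts : List String) (acc : List String) :
    parts.foldl pvStep acc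
      = ((parts.map pvNorm).filter (fun t => t ≠ "")).foldl PySem.Set.add acc := by
  induction parts generalizing acc with
  | nil => simp
  | cons p ps ih =>
    rw [List.foldl_cons, List.map_cons]
    by_cases he : pvNorm p = ""
    · rw [List.filter_cons_of_neg (by simp [he])]
      have h1 : pvStep acc p = acc := by simp [pvStep, he]
      rw [h1]; exact ih acc
    · rw [List.filter_cons_of_pos (by simp [he]), List.foldl_cons]
      have h2 : pvStep acc p = PySem.Set.add acc (pvNorm p) := by
        by_cases hc : PySem.Set.contains acc (pvNorm p)
        · have hm : pvNorm p ∈ acc := by simpa using hc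
          simp [pvStep, PySem.Set.add, hm]
        · have hm : pvNorm p ∉ acc := by simpa using hc
          simp [pvStep, PySem.Set.add, he, hm]
      rw [h2]; exact ih _

-- accumulating with Set.add equals B's filter-out-ahead dedup of the unseen elements
theorem pvDedup_nil : pvDedup [] = [] := by simp [pvDedup]

theorem pvDedup_cons (h : String) (t : List String) :
    pvDedup (h :: t) = h :: pvDedup (t.filter (fun x => x ≠ h)) := by
  rw [pvDedup]

theorem pvAddDedup (xs acc : List String) :
    xs.foldl PySem.Set.add acc
      = acc ++ pvDedup (xs.filter (fun x => ¬ acc.contains x)) := by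
  induction xs generalizing acc with
  | nil => simp [pvDedup_nil]
  | cons h t ih =>
    rw [List.foldl_cons]
    by_cases hm : h ∈ acc
    · have h1 : PySem.Set.add acc h = acc := by simp [PySem.Set.add, hm]
      rw [h1, List.filter_cons_of_neg (by simp [hm]), ih]
    · have h1 : PySem.Set.add acc h = acc ++ [h] := by simp [PySem.Set.add, hm]
      rw [h1, List.filter_cons_of_pos (by simp [hm]), ih]
      rw [pvDedup_cons, List.filter_filter]
      have hfs : (fun x => decide ¬x = h && decide (¬acc.contains x = true))
          = (fun x => ¬ (acc ++ [h]).contains x) := by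
        funext x; by_cases hx : x = h <;> simp [hx]
      rw [hfs]; simp

-- ===== VERDICT (by name: the statement is the Claim_ definition above) =====
theorem sanitize_sources_py_spec : Claim_equal_sanitize_sources_py := by
  intro sources _
  unfold Spec_sanitize_sources_py sanitize_sources_py sanitize_sources_py_alt
  rw [← List.foldl_flatMap]
  have h0 : ((PySem.Set.empty : PySem.Set String), ([] : List String))
      = ((([] : List String) : PySem.Set String), ([] : List String)) := rfl
  rw [h0, pvPairCollapse, pvStepFilter, pvAddDedup]
  simp [List.map_flatMap]
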